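-- pv_equiv track=rewrite | github.com/kobiso/Coding-Challanges | HackerRank/Short Palindrome/Short Palindrome_naive.py | shortPalindrome
-- ===== SOURCE A (Python) =====
-- def shortPalindrome(s):
--     mod = pow(10,9)+7
--     cnt = 0
--
--     for i in range(len(s)):
--         for j in range(i+1, len(s)):
--             for k in range(j+1, len(s)):
--                 if s[j]==s[k]:
--                     cnt += s[k+1:].count(s[i])
--
--     return cnt % mod
-- ===== SOURCE B (Python) =====
-- def shortPalindrome(s):
--     mod = 10 ** 9 + 7
--     ans = 0
--     for l, x in enumerate(s):
--         cx = 0       # occurrences of x in s[:k]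
--         pairs = {}   # pairs[b] = number of (i, j) with i < j < k, s[i] == x, s[j] == b
--         for b in s[:l]:
--             ans += pairs.get(b, 0)          # triples (x, b, b) closed by position k
--             pairs[b] = pairs.get(b, 0) + cx
--             if b == x:
--                 cx += 1
--     return ans % mod
-- ===== Notes on version B (the rewrite author's own statement) =====
-- stated objective: faster
-- what changed: Replaced the O(n^4) triple index loop with a per-suffix slice count by a two-level prefix scan that maintains, for each position, a running dict of (first-char, middle-char) pair counts, counting each aXXa quadruple once at its third position.
import Mathlib
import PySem

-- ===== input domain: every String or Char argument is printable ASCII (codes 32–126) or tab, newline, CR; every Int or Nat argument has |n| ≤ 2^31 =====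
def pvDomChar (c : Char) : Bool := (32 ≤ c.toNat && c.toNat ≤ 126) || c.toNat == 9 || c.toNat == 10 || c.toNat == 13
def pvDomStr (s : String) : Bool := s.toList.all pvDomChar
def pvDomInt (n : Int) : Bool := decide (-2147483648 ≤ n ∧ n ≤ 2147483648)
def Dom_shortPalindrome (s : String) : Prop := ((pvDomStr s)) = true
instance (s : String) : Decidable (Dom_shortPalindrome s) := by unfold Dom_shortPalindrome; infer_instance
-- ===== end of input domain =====

-- B replaces A's O(n^4) index loops with an O(n^2) prefix scan keeping a dict of pair counts.
-- ===== PORT A =====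
-- literal port of A: triple index loop over pyRange, counting s[i] in the slice s[k+1:]
-- (Python's 1-char string s[j] and s[k+1:].count(s[i]) are rendered on s.toList: char equality
--  and List.count of a char, exact for single-character needles)
def shortPalindrome (s : String) : Int :=
  let cs := s.toList
  let m : Int := 10 ^ 9 + 7
  let n : Int := (cs.length : Int)
  let cnt : Int :=
    (PySem.List.pyRange 0 n 1).foldl (fun cnt i =>
      (PySem.List.pyRange (i + 1) n 1).foldl (fun cnt j =>
        (PySem.List.pyRange (j + 1) n 1).foldl (fun cnt k =>
          if PySem.List.pyGetD cs j ' ' = PySem.List.pyGetD cs k ' ' then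
            cnt + ((PySem.List.count (PySem.List.slice cs (some (k + 1)) none) (PySem.List.pyGetD cs i ' ')) : Int)
          else cnt) cnt) cnt) 0
  PySem.Int.mod cnt m

-- ===== PORT B =====
-- literal port of B (Source B): for (l, x) in enumerate(s), scan the prefix s[:l] keeping
-- (ans, cx, pairs); pairs.get(b, 0) / dict assignment are Dict.getD / Dict.insert
def shortPalindrome_alt (s : String) : Int :=
  let cs := s.toList
  let m : Int := 10 ^ 9 + 7
  let ans : Int :=
    (PySem.List.enumerate cs).foldl (fun ans lx =>
      ((PySem.List.slice cs none (some lx.1)).foldl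
        (fun (st : Int × Int × PySem.Dict Char Int) b =>
          (st.1 + st.2.2.getD b 0,
           (if b = lx.2 then st.2.1 + 1 else st.2.1),
           st.2.2.insert b (st.2.2.getD b 0 + st.2.1)))
        (ans, 0, PySem.Dict.empty)).1) 0
  PySem.Int.mod ans m

-- ===== PRECONDITION & SPEC =====
def Spec_shortPalindrome (s : String) (out : Int) : Prop := out = shortPalindrome_alt s
instance (s : String) (out : Int) : Decidable (Spec_shortPalindrome s out) := by unfold Spec_shortPalindrome; infer_instance

-- ===== CLAIM (what is proved, stated in full; the proofs are below) =====
def Claim_equal_shortPalindrome : Prop := ∀ (s : String), Dom_shortPalindrome s → Spec_shortPalindrome s (shortPalindrome s)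

-- ===== LEMMAS AND PROOFS =====

-- model: pvPc x p = #occurrences of x in p; pvC2 x b p = #pairs i<j with p[i]=x, p[j]=b;
-- pvC3 x p = #triples i<j<k with p[i]=x, p[j]=p[k]; pvB p = #quadruples i<j<k<l with
-- p[j]=p[k], p[i]=p[l] (counted at their last position); pvA p = the same count the way A sums it
def pvPc (x : Char) (p : List Char) : Int := (p.count x : Int)
def pvC2 (x b : Char) (p : List Char) : Int :=
  ∑ j ∈ Finset.range p.length, if p.getD j ' ' = b then pvPc x (p.take j) else 0
def pvC3 (x : Char) (p : List Char) : Int :=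
  ∑ k ∈ Finset.range p.length, pvC2 x (p.getD k ' ') (p.take k)
def pvB (p : List Char) : Int :=
  ∑ l ∈ Finset.range p.length, pvC3 (p.getD l ' ') (p.take l)
def pvA (p : List Char) : Int :=
  ∑ i ∈ Finset.range p.length, ∑ j ∈ Finset.Ico (i + 1) p.length,
    ∑ k ∈ Finset.Ico (j + 1) p.length,
      if p.getD j ' ' = p.getD k ' '
      then ((p.drop (k + 1)).count (p.getD i ' ') : Int) else 0

lemma getD_snoc_lt (p : List Char) (c : Char) {j : ℕ} (h : j < p.length) :
    (p ++ [c]).getD j ' ' = p.getD j ' ' := by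
  simp [List.getD, List.getElem?_append_left h]

lemma take_snoc_le (p : List Char) (c : Char) {j : ℕ} (h : j ≤ p.length) :
    (p ++ [c]).take j = p.take j :=
  List.take_append_of_le_length h

lemma pvPc_snoc (x c : Char) (p : List Char) :
    pvPc x (p ++ [c]) = pvPc x p + (if c = x then 1 else 0) := by
  by_cases h : c = x <;> simp [pvPc, List.count_append, h]

lemma pvC2_snoc (x b c : Char) (p : List Char) :
    pvC2 x b (p ++ [c]) = pvC2 x b p + (if c = b then pvPc x p else 0) := by
  simp only [pvC2, List.length_append, List.length_singleton]
  rw [Finset.sum_range_succ]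
  congr 1
  · exact Finset.sum_congr rfl (fun j hj => by
      rw [getD_snoc_lt p c (Finset.mem_range.mp hj),
          take_snoc_le p c (le_of_lt (Finset.mem_range.mp hj))])
  · rw [show (p ++ [c]).getD p.length ' ' = c by simp [List.getD],
        take_snoc_le p c le_rfl, List.take_length]

lemma pvC3_snoc (x c : Char) (p : List Char) :
    pvC3 x (p ++ [c]) = pvC3 x p + pvC2 x c p := by
  simp only [pvC3, List.length_append, List.length_singleton]
  rw [Finset.sum_range_succ]
  congr 1
  · exact Finset.sum_congr rfl (fun k hk => by
      rw [getD_snoc_lt p c (Finset.mem_range.mp hk),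
          take_snoc_le p c (le_of_lt (Finset.mem_range.mp hk))])
  · rw [show (p ++ [c]).getD p.length ' ' = c by simp [List.getD],
        take_snoc_le p c le_rfl, List.take_length]

lemma pvB_snoc (c : Char) (p : List Char) :
    pvB (p ++ [c]) = pvB p + pvC3 c p := by
  simp only [pvB, List.length_append, List.length_singleton]
  rw [Finset.sum_range_succ]
  congr 1
  · exact Finset.sum_congr rfl (fun l hl => by
      rw [getD_snoc_lt p c (Finset.mem_range.mp hl),
          take_snoc_le p c (le_of_lt (Finset.mem_range.mp hl))])
  · rw [show (p ++ [c]).getD p.length ' ' = c by simp [List.getD],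
        take_snoc_le p c le_rfl, List.take_length]

lemma getD_take_lt (p : List Char) {j k : ℕ} (h : j < k) :
    (p.take k).getD j ' ' = p.getD j ' ' := by
  simp [List.getD, h]

lemma pvC3_expand (p : List Char) (c : Char) :
    pvC3 c p = ∑ k ∈ Finset.range p.length, ∑ j ∈ Finset.range k,
      if p.getD j ' ' = p.getD k ' ' then pvPc c (p.take j) else 0 := by
  refine Finset.sum_congr rfl (fun k hk => ?_)
  have hk' : k < p.length := Finset.mem_range.mp hk
  unfold pvC2
  rw [List.length_take, show min k p.length = k by omega]
  refine Finset.sum_congr rfl (fun j hj => ?_)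
  have hj' : j < k := Finset.mem_range.mp hj
  rw [getD_take_lt p hj', List.take_take, show min j k = j by omega]

lemma sum_Ico_guard (n a : ℕ) (f : ℕ → Int) :
    ∑ j ∈ Finset.Ico a n, f j = ∑ j ∈ Finset.range n, if a ≤ j then f j else 0 := by
  rw [show Finset.Ico a n = {j ∈ Finset.range n | a ≤ j} from by ext x; simp [Finset.mem_Ico]; omega,
      Finset.sum_filter]

lemma sum_range_guard_lt (n j : ℕ) (hj : j ≤ n) (g : ℕ → Int) :
    (∑ i ∈ Finset.range n, if i + 1 ≤ j then g i else 0) = ∑ i ∈ Finset.range j, g i := by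
  rw [Finset.range_eq_Ico, ← Finset.sum_Ico_consecutive _ (Nat.zero_le j) hj, ← Finset.range_eq_Ico]
  rw [Finset.sum_congr rfl (fun i hi => if_pos (by have := Finset.mem_range.mp hi; omega) :
        ∀ i ∈ Finset.range j, _ = g i),
      Finset.sum_eq_zero (fun i hi => if_neg (by have := (Finset.mem_Ico.mp hi).1; omega)), add_zero]

lemma swap2 (n : ℕ) (f : ℕ → ℕ → Int) :
    (∑ i ∈ Finset.range n, ∑ j ∈ Finset.Ico (i + 1) n, f i j)
    = ∑ j ∈ Finset.range n, ∑ i ∈ Finset.range j, f i j := by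
  calc (∑ i ∈ Finset.range n, ∑ j ∈ Finset.Ico (i + 1) n, f i j)
      = ∑ i ∈ Finset.range n, ∑ j ∈ Finset.range n, if i + 1 ≤ j then f i j else 0 :=
        Finset.sum_congr rfl (fun i _ => sum_Ico_guard n (i + 1) (f i))
    _ = ∑ j ∈ Finset.range n, ∑ i ∈ Finset.range n, if i + 1 ≤ j then f i j else 0 :=
        Finset.sum_comm
    _ = ∑ j ∈ Finset.range n, ∑ i ∈ Finset.range j, f i j :=
        Finset.sum_congr rfl (fun j hj =>
          sum_range_guard_lt n j (le_of_lt (Finset.mem_range.mp hj)) (fun i => f i j))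

lemma count_take_eq_sum (p : List Char) (x : Char) (j : ℕ) (hj : j ≤ p.length) :
    pvPc x (p.take j) = ∑ i ∈ Finset.range j, if p.getD i ' ' = x then 1 else 0 := by
  induction j with
  | zero => simp [pvPc]
  | succ j ih =>
    have hj' : j < p.length := hj
    rw [Finset.sum_range_succ, ← ih (le_of_lt hj'), List.take_succ_eq_append_getElem hj',
        show p.getD j ' ' = p[j] from by simp [List.getD, List.getElem?_eq_getElem hj']]
    simp only [pvPc, List.count_append, List.count_singleton]
    by_cases h : p[j] = x <;> simp [h, beq_iff_eq]

lemma delta_eq (p : List Char) (c : Char) :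
    (∑ i ∈ Finset.range p.length, ∑ j ∈ Finset.Ico (i + 1) p.length,
      ∑ k ∈ Finset.Ico (j + 1) p.length,
        if p.getD j ' ' = p.getD k ' ' then (if p.getD i ' ' = c then (1 : Int) else 0) else 0)
    = pvC3 c p := by
  rw [swap2 p.length (fun i j => ∑ k ∈ Finset.Ico (j + 1) p.length,
        if p.getD j ' ' = p.getD k ' ' then (if p.getD i ' ' = c then (1 : Int) else 0) else 0)]
  rw [Finset.sum_congr rfl (fun j _ => Finset.sum_comm)]
  rw [swap2 p.length (fun j k => ∑ i ∈ Finset.range j,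
        if p.getD j ' ' = p.getD k ' ' then (if p.getD i ' ' = c then (1 : Int) else 0) else 0)]
  rw [pvC3_expand]
  refine Finset.sum_congr rfl (fun k hk => Finset.sum_congr rfl (fun j hj => ?_))
  have hk' : k < p.length := Finset.mem_range.mp hk
  have hj' : j < k := Finset.mem_range.mp hj
  rw [count_take_eq_sum p c j (by omega)]
  by_cases h : p.getD j ' ' = p.getD k ' ' <;> simp

lemma pvA_snoc (p : List Char) (c : Char) :
    pvA (p ++ [c]) = pvA p +
      ∑ i ∈ Finset.range p.length, ∑ j ∈ Finset.Ico (i + 1) p.length,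
        ∑ k ∈ Finset.Ico (j + 1) p.length,
          if p.getD j ' ' = p.getD k ' ' then (if p.getD i ' ' = c then (1 : Int) else 0) else 0 := by
  unfold pvA
  simp only [List.length_append, List.length_singleton]
  rw [Finset.sum_range_succ]
  rw [show Finset.Ico (p.length + 1) (p.length + 1) = ∅ from Finset.Ico_self _]
  simp only [Finset.sum_empty, add_zero]
  rw [← Finset.sum_add_distrib]
  refine Finset.sum_congr rfl (fun i hi => ?_)
  have hi' : i < p.length := Finset.mem_range.mp hi
  rw [Finset.sum_Ico_succ_top (by omega : i + 1 ≤ p.length)]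
  rw [show Finset.Ico (p.length + 1) (p.length + 1) = ∅ from Finset.Ico_self _]
  simp only [Finset.sum_empty, add_zero]
  rw [← Finset.sum_add_distrib]
  refine Finset.sum_congr rfl (fun j hj => ?_)
  have hj' : j < p.length := (Finset.mem_Ico.mp hj).2
  rw [Finset.sum_Ico_succ_top (by omega : j + 1 ≤ p.length)]
  have hdropn : ((p ++ [c]).drop (p.length + 1)) = [] := by
    apply List.drop_eq_nil_of_le; simp
  rw [hdropn]
  simp only [List.count_nil, Nat.cast_zero, ite_self, add_zero]
  rw [← Finset.sum_add_distrib]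
  refine Finset.sum_congr rfl (fun k hk => ?_)
  have hk' : k < p.length := (Finset.mem_Ico.mp hk).2
  rw [getD_snoc_lt p c hi', getD_snoc_lt p c hj', getD_snoc_lt p c hk']
  rw [show (p ++ [c]).drop (k + 1) = p.drop (k + 1) ++ [c] from
    List.drop_append_of_le_length (by omega)]
  rw [List.count_append]
  have hc : ((List.count (p.getD i ' ') [c] : ℕ) : Int) = if p.getD i ' ' = c then 1 else 0 := by
    rcases eq_or_ne (p.getD i ' ') c with h2 | h2
    · rw [if_pos h2, h2]; simp
    · rw [if_neg h2, List.count_eq_zero.mpr (by simpa [List.getD] using h2), Nat.cast_zero]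
  by_cases h : p.getD j ' ' = p.getD k ' '
  · rw [if_pos h, if_pos h, if_pos h, ← hc]; push_cast; ring
  · rw [if_neg h, if_neg h, if_neg h, add_zero]

lemma pvA_eq_pvB (p : List Char) : pvA p = pvB p := by
  induction p using List.reverseRecOn with
  | nil => simp [pvA, pvB]
  | append_singleton p c ih => rw [pvA_snoc, pvB_snoc, ih, delta_eq]

-- ===== A port = pvA =====
lemma foldl_ite_add {β : Type} (l : List β) (C : β → Prop) [DecidablePred C] (v : β → Int)
    (a : Int) :
    l.foldl (fun acc x => if C x then acc + v x else acc) a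
      = a + (l.map (fun x => if C x then v x else 0)).sum := by
  rw [PySem.List.foldl_congr_mem l _ (fun acc x => acc + (if C x then v x else 0)) a
      (fun acc x _ => by by_cases h : C x <;> simp [h])]
  exact PySem.List.foldl_add l _ a

lemma sum_map_range (n : ℕ) (f : ℕ → Int) :
    ((List.range n).map f).sum = ∑ i ∈ Finset.range n, f i := by
  induction n with
  | zero => simp
  | succ n ih => rw [List.range_succ, List.map_append, List.sum_append, Finset.sum_range_succ, ih]; simp

lemma pyRange_shift_sum (m n : ℕ) (g : ℤ → Int) :
    ((PySem.List.pyRange (m : ℤ) (n : ℤ) 1).map g).sum = ∑ t ∈ Finset.Ico m n, g (t : ℤ) := by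
  rw [PySem.List.pyRange_one, List.map_map, sum_map_range, Finset.sum_Ico_eq_sum_range,
      show ((n : ℤ) - (m : ℤ)).toNat = n - m by omega]
  exact Finset.sum_congr rfl (fun t _ => by simp only [Function.comp]; push_cast; ring_nf)

lemma portA_cnt (cs : List Char) :
    (PySem.List.pyRange 0 (cs.length : ℤ) 1).foldl (fun cnt i =>
      (PySem.List.pyRange (i + 1) (cs.length : ℤ) 1).foldl (fun cnt j =>
        (PySem.List.pyRange (j + 1) (cs.length : ℤ) 1).foldl (fun cnt k =>
          if PySem.List.pyGetD cs j ' ' = PySem.List.pyGetD cs k ' ' then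
            cnt + ((PySem.List.count (PySem.List.slice cs (some (k + 1)) none)
                      (PySem.List.pyGetD cs i ' ')) : Int)
          else cnt) cnt) cnt) 0 = pvA cs := by
  have hmid : ∀ (i : ℤ) (acc : Int),
      (PySem.List.pyRange (i + 1) (cs.length : ℤ) 1).foldl (fun cnt j =>
        (PySem.List.pyRange (j + 1) (cs.length : ℤ) 1).foldl (fun cnt k =>
          if PySem.List.pyGetD cs j ' ' = PySem.List.pyGetD cs k ' ' then
            cnt + ((PySem.List.count (PySem.List.slice cs (some (k + 1)) none)
                      (PySem.List.pyGetD cs i ' ')) : Int)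
          else cnt) cnt) acc
      = acc + ((PySem.List.pyRange (i + 1) (cs.length : ℤ) 1).map (fun j =>
          ((PySem.List.pyRange (j + 1) (cs.length : ℤ) 1).map (fun k =>
            if PySem.List.pyGetD cs j ' ' = PySem.List.pyGetD cs k ' ' then
              ((PySem.List.count (PySem.List.slice cs (some (k + 1)) none)
                  (PySem.List.pyGetD cs i ' ')) : Int)
            else 0)).sum)).sum := by
    intro i acc
    rw [PySem.List.foldl_congr_mem _ _ (fun cnt j =>
          cnt + ((PySem.List.pyRange (j + 1) (cs.length : ℤ) 1).map (fun k =>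
            if PySem.List.pyGetD cs j ' ' = PySem.List.pyGetD cs k ' ' then
              ((PySem.List.count (PySem.List.slice cs (some (k + 1)) none)
                  (PySem.List.pyGetD cs i ' ')) : Int)
            else 0)).sum) acc
          (fun acc2 j _ => foldl_ite_add _ _ _ acc2)]
    exact PySem.List.foldl_add _ _ acc
  rw [PySem.List.foldl_congr_mem _ _ (fun cnt i =>
        cnt + ((PySem.List.pyRange (i + 1) (cs.length : ℤ) 1).map (fun j =>
          ((PySem.List.pyRange (j + 1) (cs.length : ℤ) 1).map (fun k =>
            if PySem.List.pyGetD cs j ' ' = PySem.List.pyGetD cs k ' ' then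
              ((PySem.List.count (PySem.List.slice cs (some (k + 1)) none)
                  (PySem.List.pyGetD cs i ' ')) : Int)
            else 0)).sum)).sum) 0
        (fun acc i _ => hmid i acc)]
  rw [PySem.List.foldl_add, zero_add]
  rw [show (0 : ℤ) = ((0 : ℕ) : ℤ) by simp]
  rw [pyRange_shift_sum 0 cs.length]
  rw [← Finset.range_eq_Ico]
  unfold pvA
  refine Finset.sum_congr rfl (fun i hi => ?_)
  rw [show ((i : ℤ) + 1) = (((i + 1 : ℕ)) : ℤ) by push_cast; ring]
  rw [pyRange_shift_sum (i + 1) cs.length]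
  refine Finset.sum_congr rfl (fun j hj => ?_)
  rw [show ((j : ℤ) + 1) = (((j + 1 : ℕ)) : ℤ) by push_cast; ring]
  rw [pyRange_shift_sum (j + 1) cs.length]
  refine Finset.sum_congr rfl (fun k hk => ?_)
  rw [PySem.List.pyGetD_natCast, PySem.List.pyGetD_natCast, PySem.List.pyGetD_natCast,
      show ((k : ℤ) + 1) = (((k + 1 : ℕ)) : ℤ) by push_cast; ring,
      PySem.List.slice_from_natCast, PySem.List.count_eq]
  simp

lemma portA_eq (s : String) :
    shortPalindrome s = PySem.Int.mod (pvA s.toList) (10 ^ 9 + 7) := by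
  simp only [shortPalindrome]
  rw [portA_cnt]

-- ===== B port = pvB =====
lemma innerB_spec (x : Char) (q : List Char) (a0 : Int) :
    ∃ d : PySem.Dict Char Int,
      q.foldl (fun (st : Int × Int × PySem.Dict Char Int) b =>
          (st.1 + st.2.2.getD b 0,
           (if b = x then st.2.1 + 1 else st.2.1),
           st.2.2.insert b (st.2.2.getD b 0 + st.2.1))) (a0, 0, PySem.Dict.empty)
        = (a0 + pvC3 x q, pvPc x q, d)
      ∧ ∀ b, d.getD b 0 = pvC2 x b q := by
  induction q using List.reverseRecOn with
  | nil =>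
    exact ⟨PySem.Dict.empty, by simp [pvC3, pvPc],
      fun b => by simp [pvC2, PySem.Dict.getD_empty]⟩
  | append_singleton q c ih =>
    obtain ⟨d, hfold, hd⟩ := ih
    refine ⟨d.insert c (d.getD c 0 + pvPc x q), ?_, fun b => ?_⟩
    · rw [List.foldl_append, hfold]
      simp only [List.foldl_cons, List.foldl_nil]
      refine Prod.ext ?_ (Prod.ext ?_ ?_)
      · show a0 + pvC3 x q + d.getD c 0 = a0 + pvC3 x (q ++ [c])
        rw [hd c, pvC3_snoc]; ring
      · show (if c = x then pvPc x q + 1 else pvPc x q) = pvPc x (q ++ [c])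
        rw [pvPc_snoc]; split_ifs <;> ring
      · rfl
    · rw [PySem.Dict.getD_insert, pvC2_snoc]
      rcases eq_or_ne b c with h | h
      · rw [if_pos h, if_pos h.symm, hd c, h]
      · rw [if_neg h, if_neg (Ne.symm h), hd b, add_zero]

lemma portB_ans (cs : List Char) :
    (PySem.List.enumerate cs).foldl (fun ans lx =>
      ((PySem.List.slice cs none (some lx.1)).foldl
        (fun (st : Int × Int × PySem.Dict Char Int) b =>
          (st.1 + st.2.2.getD b 0,
           (if b = lx.2 then st.2.1 + 1 else st.2.1),
           st.2.2.insert b (st.2.2.getD b 0 + st.2.1)))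
        (ans, 0, PySem.Dict.empty)).1) 0 = pvB cs := by
  suffices h : ∀ (p : List Char) (a0 : Int),
      (∀ lx ∈ PySem.List.enumerate p (0 : ℤ),
        PySem.List.slice cs none (some lx.1) = PySem.List.slice p none (some lx.1)) →
      (PySem.List.enumerate p).foldl (fun ans lx =>
        ((PySem.List.slice cs none (some lx.1)).foldl
          (fun (st : Int × Int × PySem.Dict Char Int) b =>
            (st.1 + st.2.2.getD b 0,
             (if b = lx.2 then st.2.1 + 1 else st.2.1),
             st.2.2.insert b (st.2.2.getD b 0 + st.2.1)))
          (ans, 0, PySem.Dict.empty)).1) a0 = a0 + pvB p by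
    rw [h cs 0 (fun _ _ => rfl), zero_add]
  intro p
  induction p using List.reverseRecOn with
  | nil => intro a0 _; simp [pvB, PySem.List.enumerate_nil]
  | append_singleton p c ih =>
    intro a0 hsl
    rw [PySem.List.enumerate_append, PySem.List.enumerate_cons, PySem.List.enumerate_nil,
        List.foldl_append]
    have hmem : ∀ lx ∈ PySem.List.enumerate p (0 : ℤ),
        PySem.List.slice cs none (some lx.1) = PySem.List.slice p none (some lx.1) := by
      intro lx hlx
      obtain ⟨k, hk, rfl⟩ := (PySem.List.mem_enumerate_iff p 0 lx).mp hlx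
      rw [hsl _ (by rw [PySem.List.enumerate_append]
                    exact List.mem_append_left _ hlx)]
      simp only [zero_add]
      rw [PySem.List.slice_to_natCast, PySem.List.slice_to_natCast,
          take_snoc_le p c (le_of_lt hk)]
    rw [ih a0 hmem]
    simp only [List.foldl_cons, List.foldl_nil]
    have hslast : PySem.List.slice cs none (some ((0 : ℤ) + (p.length : ℤ))) = p := by
      rw [hsl ((0 : ℤ) + (p.length : ℤ), c) (by
            rw [PySem.List.enumerate_append, PySem.List.enumerate_cons, PySem.List.enumerate_nil]
            exact List.mem_append_right _ (List.mem_singleton.mpr rfl))]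
      rw [show ((0 : ℤ) + (p.length : ℤ)) = ((p.length : ℕ) : ℤ) by ring]
      rw [PySem.List.slice_to_natCast]
      exact (take_snoc_le p c le_rfl).trans (List.take_length)
    rw [hslast]
    obtain ⟨d, hfold, -⟩ := innerB_spec c p (a0 + pvB p)
    rw [hfold, pvB_snoc]
    show a0 + pvB p + pvC3 c p = a0 + (pvB p + pvC3 c p)
    ring

lemma portB_eq (s : String) :
    shortPalindrome_alt s = PySem.Int.mod (pvB s.toList) (10 ^ 9 + 7) := by
  simp only [shortPalindrome_alt]
  rw [portB_ans]

-- ===== VERDICT (by name: the statement is the Claim_ definition above) =====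
theorem shortPalindrome_spec : Claim_equal_shortPalindrome := by
  intro s _
  show shortPalindrome s = shortPalindrome_alt s
  rw [portA_eq, portB_eq, pvA_eq_pvB]
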